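-- pv_equiv track=rewrite | github.com/IagoAlm/DnD | funcDama.py | lerInput
-- ===== SOURCE A (Python) =====
-- def lerInput(entrada):
--     linha = list()
--     tabuleiro = list()
--     coluna = 1
--     contr = 0
--     fileira = 1
--     for i in range(0, len(entrada)*2, 1):
--         if fileira % 2 != 0:
--             if coluna % 2 == 0:
--                 linha.append(entrada[contr])
--                 contr += 1
--             else:
--                 linha.append(' ')
--
--         elif fileira % 2 == 0:
--             if coluna % 2 != 0:
--                 linha.append(entrada[contr])
--                 contr += 1
--             else:
--                 linha.append(' ')
--
--         if coluna < 8: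
--             coluna = coluna + 1
--         else:
--             tabuleiro.append(linha)
--             linha = []
--             coluna = 1
--             fileira = fileira + 1
--     return tabuleiro
-- ===== SOURCE B (Python) =====
-- def lerInput(entrada):
--     tabuleiro = []
--     for r in range(len(entrada) // 4):
--         v = entrada[4 * r:4 * r + 4]
--         if r % 2 == 0:
--             tabuleiro.append([' ', v[0], ' ', v[1], ' ', v[2], ' ', v[3]])
--         else:
--             tabuleiro.append([v[0], ' ', v[1], ' ', v[2], ' ', v[3], ' '])
--     return tabuleiro
-- ===== Notes on version B (the rewrite author's own statement) =====
-- stated objective: simpler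
-- what changed: Replaces A's flat per-cell loop over 2*len steps with mutable column/row counters and an overflow flush by a direct per-row pass: take the 4-char slice for each complete row and interleave it with single-space placeholders according to the row's parity.
import Mathlib
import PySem

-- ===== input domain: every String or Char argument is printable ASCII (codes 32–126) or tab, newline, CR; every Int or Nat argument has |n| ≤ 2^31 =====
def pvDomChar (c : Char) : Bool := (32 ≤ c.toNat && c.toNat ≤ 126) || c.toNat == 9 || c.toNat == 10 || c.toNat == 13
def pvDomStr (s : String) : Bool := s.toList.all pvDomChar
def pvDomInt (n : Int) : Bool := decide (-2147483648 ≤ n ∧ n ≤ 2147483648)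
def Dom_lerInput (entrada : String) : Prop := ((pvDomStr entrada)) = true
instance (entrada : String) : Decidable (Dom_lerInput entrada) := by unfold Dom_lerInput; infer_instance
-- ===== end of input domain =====

-- B replaces A's flat per-cell loop (column/row counters, overflow flush) by a per-row
-- slice-and-interleave pass; objective: simpler.

-- ===== PORT A =====
-- entrada[contr] yields a 1-char string in Python; ported as String.ofList [c] of the code point.
-- pyGet? = none is Python's IndexError; contr never leaves range in A's loop, so "" is unreachable.
def pvCellA (cs : List Char) (i : Int) : String :=
  match PySem.List.pyGet? cs i with
  | some c => String.ofList [c]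
  | none => ""

-- loop body of A: state (linha, tabuleiro, coluna, contr, fileira)
def pvStepA (cs : List Char)
    (st : List String × List (List String) × Int × Int × Int) :
    List String × List (List String) × Int × Int × Int :=
  let (linha, tab, coluna, contr, fileira) := st
  let (linha, contr) :=
    if fileira % 2 ≠ 0 then
      if coluna % 2 = 0 then (linha ++ [pvCellA cs contr], contr + 1)
      else (linha ++ [" "], contr)
    else if fileira % 2 = 0 then
      if coluna % 2 ≠ 0 then (linha ++ [pvCellA cs contr], contr + 1)
      else (linha ++ [" "], contr)
    else (linha, contr)
  if coluna < 8 then (linha, tab, coluna + 1, contr, fileira)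
  else ([], tab ++ [linha], 1, contr, fileira + 1)

def lerInput (entrada : String) : List (List String) :=
  ((PySem.List.pyRange 0 (2 * PySem.Str.len entrada) 1).foldl
      (fun st _ => pvStepA entrada.toList st) ([], [], 1, 0, 1)).2.1

-- ===== PORT B =====
-- v[j] for the 4-char slice v; the "" IndexError default is unreachable for complete rows.
def pvCellB (v : List Char) (j : Int) : String :=
  match PySem.List.pyGet? v j with
  | some c => String.ofList [c]
  | none => ""

def pvRowB (cs : List Char) (r : Nat) : List String :=
  let v := PySem.List.slice cs (some ((4 * r : Nat) : Int)) (some ((4 * r + 4 : Nat) : Int))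
  if r % 2 = 0 then
    [" ", pvCellB v 0, " ", pvCellB v 1, " ", pvCellB v 2, " ", pvCellB v 3]
  else
    [pvCellB v 0, " ", pvCellB v 1, " ", pvCellB v 2, " ", pvCellB v 3, " "]

def lerInput_alt (entrada : String) : List (List String) :=
  (List.range (entrada.toList.length / 4)).foldl
    (fun tab r => tab ++ [pvRowB entrada.toList r]) []

-- ===== PRECONDITION & SPEC =====
def Spec_lerInput (entrada : String) (out : List (List String)) : Prop := out = lerInput_alt entrada
instance (entrada : String) (out : List (List String)) : Decidable (Spec_lerInput entrada out) := by unfold Spec_lerInput; infer_instance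

-- ===== CLAIM (what is proved, stated in full; the proofs are below) =====
def Claim_equal_lerInput : Prop := ∀ (entrada : String), Dom_lerInput entrada → Spec_lerInput entrada (lerInput entrada)

-- ===== LEMMAS AND PROOFS =====

-- the row A's loop produces starting at contr = c in row fileira = f
def pvRowA (cs : List Char) (f c : Int) : List String :=
  if f % 2 ≠ 0 then
    [" ", pvCellA cs c, " ", pvCellA cs (c + 1), " ", pvCellA cs (c + 2), " ", pvCellA cs (c + 3)]
  else
    [pvCellA cs c, " ", pvCellA cs (c + 1), " ", pvCellA cs (c + 2), " ", pvCellA cs (c + 3), " "]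

theorem pv_foldl_const {α β : Type} (g : α → α) :
    ∀ (l : List β) (x : α), l.foldl (fun st _ => g st) x = g^[l.length] x := by
  intro l
  induction l with
  | nil => intro x; rfl
  | cons b bs ih =>
      intro x
      simp [List.foldl, ih, Function.iterate_succ_apply]

theorem pv_row8 (cs : List Char) (T : List (List String)) (c f : Int) :
    (pvStepA cs)^[8] ([], T, 1, c, f) = ([], T ++ [pvRowA cs f c], 1, c + 4, f + 1) := by
  rcases Int.emod_two_eq f with h | h <;>
    simp [Function.iterate_succ_apply, pvStepA, pvRowA, h] <;> ring_nf <;> simp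

theorem pv_chunks (cs : List Char) :
    ∀ (k : Nat), (pvStepA cs)^[8 * k] ([], [], 1, 0, 1) =
      ([], (List.range k).map (fun (r : Nat) => pvRowA cs ((r : Int) + 1) ((4 * r : Nat) : Int)),
        1, ((4 * k : Nat) : Int), (k : Int) + 1) := by
  intro k
  induction k with
  | zero => norm_num
  | succ k ih =>
      have h8 : 8 * (k + 1) = 8 + 8 * k := by ring
      rw [h8, Function.iterate_add_apply, ih, pv_row8]
      simp only [Prod.mk.injEq, true_and]
      refine ⟨?_, ?_, ?_⟩
      · simp [List.range_succ]
      · push_cast; ring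
      · push_cast; ring

theorem pv_tab_stable (cs : List Char) :
    ∀ (m : Nat) (linha : List String) (T : List (List String)) (coluna contr f : Int),
      coluna + m ≤ 8 →
      ((pvStepA cs)^[m] (linha, T, coluna, contr, f)).2.1 = T := by
  intro m
  induction m with
  | zero => intro _ T _ _ _ _; rfl
  | succ m ih =>
      intro linha T coluna contr f h
      have hc : coluna < 8 := by omega
      rw [Function.iterate_succ_apply]
      by_cases h1 : f % 2 = 0 <;> by_cases h2 : coluna % 2 = 0 <;>
        simp only [pvStepA, h1, h2, if_pos, if_neg, ne_eq, not_true_eq_false, not_false_eq_true,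
          if_pos hc] <;>
        exact ih _ _ _ _ _ (by push_cast at h ⊢; omega)

theorem pv_foldl_snoc {α β : Type} (h : β → α) :
    ∀ (l : List β) (acc : List α), l.foldl (fun b r => b ++ [h r]) acc = acc ++ l.map h := by
  intro l
  induction l with
  | nil => intro acc; simp
  | cons b bs ih => intro acc; simp [List.foldl, ih]

-- cells agree: A's flat index 4r+j equals B's slice index j
theorem pv_cell_eq (cs : List Char) (r : Nat) (_hr : 4 * r + 4 ≤ cs.length)
    (j : Nat) (hj : j < 4) :
    pvCellA cs (((4 * r : Nat) : Int) + (j : Int)) =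
      pvCellB (PySem.List.slice cs (some ((4 * r : Nat) : Int)) (some ((4 * r + 4 : Nat) : Int)))
        ((j : Nat) : Int) := by
  have hcast : ((4 * r : Nat) : Int) + (j : Int) = ((4 * r + j : Nat) : Int) := by push_cast; ring
  rw [hcast]
  unfold pvCellA pvCellB
  rw [PySem.List.slice_natCast, show 4 * r + 4 - 4 * r = 4 from by omega]
  rw [PySem.List.pyGet?_natCast, PySem.List.pyGet?_natCast]
  rw [List.getElem?_take_of_lt hj, List.getElem?_drop]

theorem pv_row_eq (cs : List Char) (r : Nat) (hr : 4 * r + 4 ≤ cs.length) :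
    pvRowA cs ((r : Int) + 1) ((4 * r : Nat) : Int) = pvRowB cs r := by
  have h0 := pv_cell_eq cs r hr 0 (by omega)
  have h1 := pv_cell_eq cs r hr 1 (by omega)
  have h2 := pv_cell_eq cs r hr 2 (by omega)
  have h3 := pv_cell_eq cs r hr 3 (by omega)
  unfold pvRowA pvRowB
  dsimp only
  push_cast at h0 h1 h2 h3 ⊢
  rw [add_zero] at h0
  split_ifs with hA hB <;> first | (exfalso; omega) | rw [h0, h1, h2, h3]

-- ===== VERDICT (by name: the statement is the Claim_ definition above) =====
theorem lerInput_spec : Claim_equal_lerInput := by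
  intro entrada _
  unfold Spec_lerInput lerInput lerInput_alt
  rw [pv_foldl_const]
  have hlenrange : (PySem.List.pyRange 0 (2 * PySem.Str.len entrada) 1).length
      = 2 * entrada.toList.length := by
    rw [PySem.List.length_pyRange_one, PySem.Str.len_eq]
    omega
  rw [hlenrange]
  have hsplit : 2 * entrada.toList.length =
      2 * (entrada.toList.length % 4) + 8 * (entrada.toList.length / 4) := by omega
  rw [hsplit, Function.iterate_add_apply, pv_chunks,
    pv_tab_stable entrada.toList (2 * (entrada.toList.length % 4)) _ _ _ _ _ (by omega)]
  rw [pv_foldl_snoc]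
  simp only [List.nil_append]
  apply List.map_congr_left
  intro r hr
  rw [List.mem_range] at hr
  exact pv_row_eq entrada.toList r (by omega)
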